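-- pv_equiv track=rewrite | github.com/qifanyyy/JupyterNotebook | new_algs/Sequence+algorithms/Smith-Waterman+algorithm/Vhaijaiyanthi_pa3.py | leftArc
-- ===== SOURCE A (Python) =====
-- from collections import defaultdict
--
-- def leftArc(all, tag_group):
--
--     allLeft = []
--     for h in all:
--         stay = defaultdict(list)
--         for i in h:
--             j = h[i][::2]
--             k = h[i][1::2]
--             # ELEMENTS WITH AN INDEX VALUE GREATER THAN THE INDEX NUMBER IN A SENTENCE
--             # ARE COLLECTED AND APPENDED TO A LIST
--             for l in range(len(j)):
--                 if j[l] > k[l]: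
--                     stay[i].append(j[l])
--         allLeft.append(dict(stay)) #LIST
--
--     allList_left = {}
--
--     for h in tag_group:
--
--         leftTag = []
--         for i in all:
--             if h in i:
--                 leftTag.append(list(i[h][1::2]))
--             else:
--                 leftTag.append(["null"])
--
--         allList_left[h] = leftTag # DICTIONARY
--
--     left_tree = {}
--     for tup in tag_group:
--
--         count = 0
--         stay = {}
--         for sentence in allLeft:
--             if tup in sentence:
--                 j = sentence[tup]
--                 for diff_tags in allList_left:
--                     i = allList_left[diff_tags]
--                     l = i[count]
--                     for h in range(len(j)):
--                         if j[h] in l or j[h] == l: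
--                             if diff_tags in stay:
--                                 stay[diff_tags] = stay[diff_tags] + 1
--                             else:
--                                 stay[diff_tags] = 1
--             count += 1
--
--         left_tree[tup] = stay
--
--     return left_tree
-- ===== SOURCE B (Python) =====
-- from collections import Counter
--
-- def leftArc(all, tag_group):
--     tags = list(dict.fromkeys(tag_group))
--     result = {t: {} for t in tags}
--     for sent in all:
--         # inverted index: value -> set of tags whose odd-position values contain it
--         inv = {}
--         for t in tags:
--             seq = sent.get(t)
--             if seq is not None:
--                 for v in seq[1::2]:
--                     inv.setdefault(v, set()).add(t)
--         for tup, seq in sent.items():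
--             if tup not in result:
--                 continue
--             cnt = Counter()
--             for i in range(0, len(seq), 2):
--                 if seq[i] > seq[i + 1]:
--                     cnt.update(inv.get(seq[i], ()))
--             stay = result[tup]
--             for t in tags:
--                 if cnt[t]:
--                     stay[t] = stay.get(t, 0) + cnt[t]
--     return result
-- ===== Notes on version B (the rewrite author's own statement) =====
-- stated objective: faster
-- what changed: B replaces A's tag-major quadruple loop (for every tag and sentence, rescan every other tag's sentinel-padded odd-value list once per left value) by a single pass over sentences that builds an inverted index value->set-of-tags and a per-pair Counter, so the tags matching a left value are found by hash lookup instead of scanning lists.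
import Mathlib
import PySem

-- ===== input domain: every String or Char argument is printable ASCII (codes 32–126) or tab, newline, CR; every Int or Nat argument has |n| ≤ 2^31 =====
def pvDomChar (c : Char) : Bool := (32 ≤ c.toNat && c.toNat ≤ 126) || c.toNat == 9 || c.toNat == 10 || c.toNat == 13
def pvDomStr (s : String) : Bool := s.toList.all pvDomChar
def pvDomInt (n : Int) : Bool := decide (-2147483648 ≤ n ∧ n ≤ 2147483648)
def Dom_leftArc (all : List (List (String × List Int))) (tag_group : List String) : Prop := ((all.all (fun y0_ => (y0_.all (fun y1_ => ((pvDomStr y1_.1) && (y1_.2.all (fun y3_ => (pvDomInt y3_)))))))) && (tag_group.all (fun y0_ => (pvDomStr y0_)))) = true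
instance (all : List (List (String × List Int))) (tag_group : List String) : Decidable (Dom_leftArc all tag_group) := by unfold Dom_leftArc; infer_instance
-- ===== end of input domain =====

-- B replaces A's tag-major quadruple loop (per tag, per sentence, per tag, scan each odd-value list
-- for every left value) by one pass over sentences that builds a per-sentence INVERTED INDEX
-- value -> set-of-tags and a per-pair Counter, so matching tags are found by lookup, not by scanning.
-- Mutation note: neither program mutates its arguments; the equivalence is about the return value.

-- shared shorthand for the slices v[::2] and v[1::2] both Pythons write (step 2 ≠ 0, so slice? is never none)
def pvEven (v : List Int) : List Int := (PySem.List.slice? v none none 2).getD []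
def pvOdd (v : List Int) : List Int := (PySem.List.slice? v (some 1) none 2).getD []

-- ===== PORT A =====
def leftArc (all : List (List (String × List Int))) (tag_group : List String) : List (String × List (String × Int)) :=
  -- phase 1: for h in all: stay = defaultdict(list); for i in h: ... ; allLeft.append(dict(stay))
  let allLeft : List (PySem.Dict String (List Int)) :=
    all.foldl (fun acc sent =>
      let h := PySem.Dict.mk sent
      let stay :=
        h.keys.foldl (fun stay i =>
          let v := h.getD i []
          let j := pvEven v   -- h[i][::2]
          let k := pvOdd v    -- h[i][1::2]
          -- for l in range(len(j)): if j[l] > k[l]: stay[i].append(j[l])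
          -- (k[l] raises IndexError when len(h[i]) is odd — those inputs are outside Pre_)
          (PySem.List.pyRange 0 (PySem.List.len j)).foldl (fun stay l =>
            if PySem.List.pyGetD j l 0 > PySem.List.pyGetD k l 0 then
              stay.insert i (stay.getD i [] ++ [PySem.List.pyGetD j l 0])  -- defaultdict append
            else stay) stay) PySem.Dict.empty
      acc ++ [stay]) []
  -- phase 2: allList_left[h] = [list(i[h][1::2]) if h in i else ["null"] for i in all]
  -- ["null"] is rendered as `none`: no int is ever an element of (or equal to) ["null"] in Python
  let allList_left : PySem.Dict String (List (Option (List Int))) :=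
    tag_group.foldl (fun d hh =>
      let leftTag :=
        all.foldl (fun acc sent =>
          let i := PySem.Dict.mk sent
          if i.contains hh then acc ++ [some (pvOdd (i.getD hh []))]
          else acc ++ [none]) []
      d.insert hh leftTag) PySem.Dict.empty
  -- phase 3
  let left_tree : PySem.Dict String (PySem.Dict String Int) :=
    tag_group.foldl (fun lt tup =>
      let stay :=
        (allLeft.foldl (fun (p : PySem.Dict String Int × Int) sentence =>
          let stay :=
            if sentence.contains tup then
              let j := sentence.getD tup []
              allList_left.keys.foldl (fun stay diff_tags =>
                let i := allList_left.getD diff_tags []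
                let l := PySem.List.pyGetD i p.2 none
                (PySem.List.pyRange 0 (PySem.List.len j)).foldl (fun stay hIdx =>
                  -- `j[h] in l or j[h] == l`: j[h] in ["null"] and j[h] == l (int vs list) are False in Python
                  if (match l with
                      | some xs => xs.contains (PySem.List.pyGetD j hIdx 0)
                      | none => false) then
                    if stay.contains diff_tags then
                      stay.insert diff_tags (stay.getD diff_tags 0 + 1)
                    else stay.insert diff_tags 1
                  else stay) stay) p.1
            else p.1
          (stay, p.2 + 1)) (PySem.Dict.empty, 0)).1
      lt.insert tup stay) PySem.Dict.empty
  left_tree.items.map (fun p => (p.1, p.2.items))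

-- ===== PORT B =====
def leftArc_alt (all : List (List (String × List Int))) (tag_group : List String) : List (String × List (String × Int)) :=
  let tags := PySem.List.dedup tag_group            -- list(dict.fromkeys(tag_group))
  let result0 : PySem.Dict String (PySem.Dict String Int) :=
    tags.foldl (fun d t => d.insert t PySem.Dict.empty) PySem.Dict.empty    -- {t: {} for t in tags}
  let final :=
    all.foldl (fun result sent =>
      -- inverted index: value -> set of tags whose odd-position values contain it
      let inv : PySem.Dict Int (PySem.Set String) :=
        tags.foldl (fun inv t =>
          match (PySem.Dict.mk sent).get? t with      -- seq = sent.get(t)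
          | none => inv
          | some seq =>
            (pvOdd seq).foldl (fun inv v =>
              inv.insert v (PySem.Set.add (inv.getD v []) t)) inv)   -- inv.setdefault(v, set()).add(t)
          PySem.Dict.empty
      -- for tup, seq in sent.items(): if tup not in result: continue; ...
      sent.foldl (fun result p =>
        if result.contains p.1 then
          let cnt : PySem.Dict String Int :=          -- cnt = Counter(); for i in range(0, len(seq), 2): ...
            (PySem.List.pyRange 0 (PySem.List.len p.2) 2).foldl (fun cnt i =>
              if PySem.List.pyGetD p.2 i 0 > PySem.List.pyGetD p.2 (i+1) 0 then
                (inv.getD (PySem.List.pyGetD p.2 i 0) []).foldl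
                  (fun cnt t => cnt.insert t (cnt.getD t 0 + 1)) cnt
              else cnt) PySem.Dict.empty
          let stay :=                                  -- for t in tags: if cnt[t]: stay[t] = stay.get(t,0)+cnt[t]
            tags.foldl (fun stay t =>
              if cnt.getD t 0 ≠ 0 then stay.insert t (stay.getD t 0 + cnt.getD t 0) else stay)
              (result.getD p.1 PySem.Dict.empty)
          result.insert p.1 stay
        else result) result) result0
  final.items.map (fun p => (p.1, p.2.items))

-- ===== PRECONDITION & SPEC =====
-- Pre_ excludes (a) inputs where both Pythons raise IndexError on an odd-length tag list (A at k[l]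
-- with k = v[1::2] one shorter than j = v[::2]; B at seq[i + 1] for the unpaired last index); (b)
-- association lists in which a sentence has duplicate keys — those do not represent any Python dict
-- input (a dict cannot carry duplicate keys).
def Pre_leftArc (all : List (List (String × List Int))) (tag_group : List String) : Prop :=
  ∀ sent ∈ all, (sent.map Prod.fst).Nodup ∧ ∀ p ∈ sent, p.2.length % 2 = 0
instance (all : List (List (String × List Int))) (tag_group : List String) : Decidable (Pre_leftArc all tag_group) := by
  unfold Pre_leftArc; infer_instance

def pvWitness_leftArc : (List (List (String × List Int))) × List String :=
  ([[("N", [3, 1]), ("V", [2, 0])], [("N", [7, 2])]], ["N", "V"])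

def Spec_leftArc (all : List (List (String × List Int))) (tag_group : List String) (out : List (String × List (String × Int))) : Prop :=
  out = leftArc_alt all tag_group
instance (all : List (List (String × List Int))) (tag_group : List String) (out : List (String × List (String × Int))) : Decidable (Spec_leftArc all tag_group out) := by
  unfold Spec_leftArc; infer_instance

-- ===== CLAIM (what is proved, stated in full; the proofs are below) =====
def Claim_equal_leftArc : Prop := ∀ (all : List (List (String × List Int))) (tag_group : List String), Dom_leftArc all tag_group → Pre_leftArc all tag_group → Spec_leftArc all tag_group (leftArc all tag_group)

-- ===== LEMMAS AND PROOFS =====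

-- reference normal form shared by both directions ------------------------------------------------

def pvLf (v : List Int) : List Int :=
  (((pvEven v).zip (pvOdd v)).filter (fun q => q.1 > q.2)).map (·.1)

def pvInner (h : PySem.Dict String (List Int)) (tags : List String) (j : List Int)
    (stay : PySem.Dict String Int) : PySem.Dict String Int :=
  tags.foldl (fun stay dt =>
    match (h.get? dt).map pvOdd with
    | none => stay
    | some l =>
      if j.countP (fun v => l.contains v) = 0 then stay
      else stay.insert dt (stay.getD dt 0 + (j.countP (fun v => l.contains v) : Int))) stay

def pvT (sent : List (String × List Int)) (tags : List String) (tup : String)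
    (stay : PySem.Dict String Int) : PySem.Dict String Int :=
  match ((PySem.Dict.mk sent).get? tup).map pvLf with
  | none => stay
  | some j => if j = [] then stay else pvInner (PySem.Dict.mk sent) tags j stay

def pvGoal (all : List (List (String × List Int))) (tg : List String) :
    List (String × List (String × Int)) :=
  (PySem.List.dedup tg).map (fun t =>
    (t, (all.foldl (fun s sent => pvT sent (PySem.List.dedup tg) t s) PySem.Dict.empty).items))

-- named copies of port A's phases (definitionally equal to the port's let-bound pieces) ----------

def pvStayA (sent : List (String × List Int)) : PySem.Dict String (List Int) :=
  (PySem.Dict.mk sent).keys.foldl (fun stay i =>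
    (PySem.List.pyRange 0 (PySem.List.len (pvEven ((PySem.Dict.mk sent).getD i [])))).foldl
      (fun stay l =>
        if PySem.List.pyGetD (pvEven ((PySem.Dict.mk sent).getD i [])) l 0 >
            PySem.List.pyGetD (pvOdd ((PySem.Dict.mk sent).getD i [])) l 0 then
          stay.insert i
            (stay.getD i [] ++ [PySem.List.pyGetD (pvEven ((PySem.Dict.mk sent).getD i [])) l 0])
        else stay) stay) PySem.Dict.empty

def pvAllLeft (all : List (List (String × List Int))) : List (PySem.Dict String (List Int)) :=
  all.foldl (fun acc sent => acc ++ [pvStayA sent]) []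

def pvALL (all : List (List (String × List Int))) (tg : List String) :
    PySem.Dict String (List (Option (List Int))) :=
  tg.foldl (fun d hh =>
    d.insert hh
      (all.foldl (fun acc sent =>
        if (PySem.Dict.mk sent).contains hh then
          acc ++ [some (pvOdd ((PySem.Dict.mk sent).getD hh []))]
        else acc ++ [none]) [])) PySem.Dict.empty

def pvF (all : List (List (String × List Int))) (tg : List String) (tup : String)
    (st : PySem.Dict String Int) (c : Int) (sentence : PySem.Dict String (List Int)) :
    PySem.Dict String Int :=
  if sentence.contains tup then
    (pvALL all tg).keys.foldl (fun stay diff_tags =>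
      (PySem.List.pyRange 0 (PySem.List.len (sentence.getD tup []))).foldl (fun stay hIdx =>
        if (match PySem.List.pyGetD ((pvALL all tg).getD diff_tags []) c none with
            | some xs => xs.contains (PySem.List.pyGetD (sentence.getD tup []) hIdx 0)
            | none => false) then
          if stay.contains diff_tags then
            stay.insert diff_tags (stay.getD diff_tags 0 + 1)
          else stay.insert diff_tags 1
        else stay) stay) st
  else st

def pvStay3 (all : List (List (String × List Int))) (tg : List String) (tup : String) :
    PySem.Dict String Int :=
  ((pvAllLeft all).foldl (fun (p : PySem.Dict String Int × Int) sentence =>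
    (pvF all tg tup p.1 p.2 sentence, p.2 + 1)) (PySem.Dict.empty, 0)).1

theorem pvA_unfold (all : List (List (String × List Int))) (tg : List String) :
    leftArc all tg =
      (tg.foldl (fun lt tup => lt.insert tup (pvStay3 all tg tup)) PySem.Dict.empty).items.map
        (fun p => (p.1, p.2.items)) := rfl

-- named copies of port B's phases ----------------------------------------------------------------

def pvInv (tags : List String) (sent : List (String × List Int)) : PySem.Dict Int (PySem.Set String) :=
  tags.foldl (fun inv t =>
    match (PySem.Dict.mk sent).get? t with
    | none => inv
    | some seq =>
      (pvOdd seq).foldl (fun inv v =>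
        inv.insert v (PySem.Set.add (inv.getD v []) t)) inv) PySem.Dict.empty

def pvCnt (inv : PySem.Dict Int (PySem.Set String)) (v : List Int) : PySem.Dict String Int :=
  (PySem.List.pyRange 0 (PySem.List.len v) 2).foldl (fun cnt i =>
    if PySem.List.pyGetD v i 0 > PySem.List.pyGetD v (i+1) 0 then
      (inv.getD (PySem.List.pyGetD v i 0) []).foldl
        (fun cnt t => cnt.insert t (cnt.getD t 0 + 1)) cnt
    else cnt) PySem.Dict.empty

def pvU (tags : List String) (sent : List (String × List Int)) (v : List Int)
    (stay : PySem.Dict String Int) : PySem.Dict String Int :=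
  tags.foldl (fun stay t =>
    if (pvCnt (pvInv tags sent) v).getD t 0 ≠ 0 then
      stay.insert t (stay.getD t 0 + (pvCnt (pvInv tags sent) v).getD t 0)
    else stay) stay

def pvBStep (tags : List String) (sent : List (String × List Int))
    (result : PySem.Dict String (PySem.Dict String Int)) : PySem.Dict String (PySem.Dict String Int) :=
  sent.foldl (fun result p =>
    if result.contains p.1 then
      result.insert p.1 (pvU tags sent p.2 (result.getD p.1 PySem.Dict.empty))
    else result) result

def pvInit (tags : List String) : PySem.Dict String (PySem.Dict String Int) :=
  tags.foldl (fun d t => d.insert t PySem.Dict.empty) PySem.Dict.empty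

theorem pvB_unfold (all : List (List (String × List Int))) (tg : List String) :
    leftArc_alt all tg =
      (all.foldl (fun result sent => pvBStep (PySem.List.dedup tg) sent result)
        (pvInit (PySem.List.dedup tg))).items.map (fun p => (p.1, p.2.items)) := rfl

-- generic fold lemmas -----------------------------------------------------------------------------

theorem pv_mk_get? {b : Type} (l : List (String × b)) (t : String) :
    (PySem.Dict.mk l).get? t = (l.find? (fun p => p.1 == t)).map (·.2) := by
  induction l with
  | nil => rfl
  | cons p l ih =>
    obtain ⟨k, v⟩ := p
    rw [PySem.Dict.get?_mk_cons]
    cases hk : (k == t)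
    · rw [List.find?_cons_of_neg (by simp [hk])]
      simpa [hk] using ih
    · rw [List.find?_cons_of_pos (by simp_all)]
      simp [hk]

theorem pv_foldl_enum {s a : Type} (ys : List a) (F : s → Int → a → s) (s0 : s) (c0 : Int) :
    (ys.foldl (fun p x => (F p.1 p.2 x, p.2 + 1)) (s0, c0)).1 =
      (PySem.List.enumerate ys c0).foldl (fun st q => F st q.1 q.2) s0 := by
  induction ys generalizing s0 c0 with
  | nil => rfl
  | cons y ys ih => simpa [PySem.List.enumerate_cons] using ih (F s0 c0 y) (c0 + 1)

theorem pv_enumerate_map {a b : Type} (f : a → b) (xs : List a) (s : Int) :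
    PySem.List.enumerate (xs.map f) s = (PySem.List.enumerate xs s).map (fun q => (q.1, f q.2)) := by
  induction xs generalizing s with
  | nil => rfl
  | cons x xs ih => simp [PySem.List.enumerate_cons, ih]

theorem pv_foldl_snd {a s : Type} (xs : List a) (G : s → a → s) (s0 : s) (c0 : Int) :
    (PySem.List.enumerate xs c0).foldl (fun st q => G st q.2) s0 = xs.foldl G s0 := by
  induction xs generalizing s0 c0 with
  | nil => rfl
  | cons x xs ih => simp [PySem.List.enumerate_cons, ih]

theorem pv_app_fold (M : List Int) (i : String) (d : PySem.Dict String (List Int)) :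
    M.foldl (fun d a => d.insert i (d.getD i [] ++ [a])) d =
      if M = [] then d else d.insert i (d.getD i [] ++ M) := by
  induction M generalizing d with
  | nil => simp
  | cons a M ih =>
    rw [List.foldl_cons, ih]
    by_cases hM : M = []
    · simp [hM]
    · simp only [hM, if_false, PySem.Dict.getD_insert_self, PySem.Dict.insert_insert_self]
      simp

theorem pv_incr_fold (L : List Int) (p : Int → Bool) (k : String) (d : PySem.Dict String Int) :
    L.foldl (fun d v =>
        if p v then
          (if d.contains k then d.insert k (d.getD k 0 + 1) else d.insert k 1)
        else d) d =
      if L.countP p = 0 then d else d.insert k (d.getD k 0 + (L.countP p : Int)) := by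
  induction L generalizing d with
  | nil => simp
  | cons v L ih =>
    rw [List.foldl_cons]
    by_cases hv : p v
    · have hstep : (if p v then
          (if d.contains k then d.insert k (d.getD k 0 + 1) else d.insert k 1) else d)
          = d.insert k (d.getD k 0 + 1) := by
        cases hc : d.contains k
        · have h0 : d.getD k 0 = 0 := PySem.Dict.getD_of_not_contains d 0 hc
          simp [hv, hc, h0]
        · simp [hv, hc]
      rw [hstep, ih]
      rw [List.countP_cons]
      simp only [hv, if_true]
      by_cases hL : L.countP p = 0
      · simp [hL]
      · have h1 : ¬(L.countP p + 1 = 0) := by omega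
        simp only [hL, if_false, h1, PySem.Dict.getD_insert_self,
          PySem.Dict.insert_insert_self]
        congr 1
        push_cast
        ring
    · rw [List.countP_cons]
      simp [hv, ih]

theorem pv_keyfn_get? {n : Type} (l : List String) (f : String → n) (d : PySem.Dict String n)
    (t : String) :
    (l.foldl (fun d x => d.insert x (f x)) d).get? t =
      if t ∈ l then some (f t) else d.get? t := by
  induction l generalizing d with
  | nil => simp
  | cons x l ih =>
    rw [List.foldl_cons, ih]
    by_cases ht : t ∈ l
    · simp [ht]
    · by_cases htx : t = x
      · subst htx; simp [ht, PySem.Dict.get?_insert]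
      · simp [ht, htx, PySem.Dict.get?_insert]

theorem pv_items_keyfn {n : Type} (l : List String) (f : String → n) (dflt : n) :
    (l.foldl (fun d x => d.insert x (f x)) PySem.Dict.empty).items =
      (PySem.List.dedup l).map (fun t => (t, f t)) := by
  have hnd : (l.foldl (fun d x => d.insert x (f x)) PySem.Dict.empty).keys.Nodup :=
    PySem.Dict.nodup_keys_foldl_insert l (fun _ x => f x) PySem.Dict.empty
      PySem.Dict.nodup_keys_empty
  have hkeys : (l.foldl (fun d x => d.insert x (f x)) PySem.Dict.empty).keys =
      PySem.List.dedup l := by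
    rw [PySem.Dict.keys_foldl_insert l (fun _ x => f x) PySem.Dict.empty,
      PySem.Dict.keys_empty, PySem.Set.update_nil_left, ← PySem.List.dedup_eq_ofList]
  rw [PySem.Dict.items_eq_map_keys _ hnd dflt, hkeys]
  apply List.map_congr_left
  intro k hk
  have hkl : k ∈ l := (PySem.List.mem_dedup l k).1 hk
  have hsome : (l.foldl (fun d x => d.insert x (f x)) PySem.Dict.empty).get? k = some (f k) := by
    rw [pv_keyfn_get?]; simp [hkl]
  rw [PySem.Dict.getD_of_get?_eq_some _ dflt hsome]

theorem pv_condins_get? (l : List String) (f : String → List Int)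
    (d : PySem.Dict String (List Int)) (hf : forall i, i ∈ l → d.contains i = false)
    (hnd : l.Nodup) (t : String) :
    (l.foldl (fun d i => if f i = [] then d else d.insert i (d.getD i [] ++ f i)) d).get? t =
      if t ∈ l ∧ f t ≠ [] then some (f t) else d.get? t := by
  induction l generalizing d with
  | nil => simp
  | cons i l ih =>
    rw [List.foldl_cons]
    have hnd' : l.Nodup := (List.nodup_cons.mp hnd).2
    have hil : i ∉ l := (List.nodup_cons.mp hnd).1
    by_cases hfi : f i = []
    · rw [if_pos hfi, ih d (fun j hj => hf j (List.mem_cons_of_mem i hj)) hnd']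
      by_cases hti : t = i
      · subst hti; simp [hfi]
      · simp [hti, List.mem_cons]
    · rw [if_neg hfi]
      have hgd : d.getD i [] = [] := PySem.Dict.getD_of_not_contains d [] (hf i List.mem_cons_self)
      rw [hgd]
      have hf' : forall j, j ∈ l → (d.insert i ([] ++ f i)).contains j = false := by
        intro j hj
        rw [PySem.Dict.contains_insert]
        have h1 : (j == i) = false := by
          simp only [beq_eq_false_iff_ne, ne_eq]
          intro h; exact hil (h ▸ hj)
        simp [h1, hf j (List.mem_cons_of_mem i hj)]
      rw [ih (d.insert i ([] ++ f i)) hf' hnd']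
      by_cases hti : t = i
      · subst hti
        simp [hil, hfi, PySem.Dict.get?_insert_self]
      · by_cases htl : t ∈ l
        · by_cases hft : f t = []
          · simp [htl, hft, List.mem_cons, PySem.Dict.get?_insert_of_ne _ _ hti]
          · simp [htl, hft, List.mem_cons]
        · simp [htl, hti, PySem.Dict.get?_insert_of_ne _ _ hti]

theorem pv_jk_fold {s : Type} (j k : List Int) (hlen : j.length = k.length) (F : s → Int → s)
    (st : s) :
    (PySem.List.pyRange 0 (PySem.List.len j)).foldl (fun st l =>
        if PySem.List.pyGetD j l 0 > PySem.List.pyGetD k l 0 then F st (PySem.List.pyGetD j l 0)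
        else st) st =
      (((j.zip k).filter (fun q => q.1 > q.2)).map (·.1)).foldl F st := by
  have hzl : (j.zip k).length = j.length := by
    rw [List.length_zip, hlen, min_self]
  have hlen2 : PySem.List.len j = PySem.List.len (j.zip k) := by
    simp [PySem.List.len_eq, hzl]
  rw [hlen2]
  have hcongr : forall (st : s), forall l, l ∈ PySem.List.pyRange 0 (PySem.List.len (j.zip k)) →
      (if PySem.List.pyGetD j l 0 > PySem.List.pyGetD k l 0 then F st (PySem.List.pyGetD j l 0)
       else st) =
      ((fun st (q : Int × Int) => if q.1 > q.2 then F st q.1 else st) st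
        (PySem.List.pyGetD (j.zip k) l ((0 : Int), (0 : Int)))) := by
    intro st l hl
    rw [PySem.List.mem_pyRange_one] at hl
    obtain ⟨h0, hlt⟩ := hl
    have hlz : l < ((j.zip k).length : Int) := by
      simpa [PySem.List.len_eq] using hlt
    have hjl : l < (j.length : Int) := by
      rw [hzl] at hlz
      exact hlz
    have hkl : l < (k.length : Int) := by omega
    have hzz : l < ((j.zip k).length : Int) := by omega
    have hjz : PySem.List.pyGetD j l 0 = (PySem.List.pyGetD (j.zip k) l ((0 : Int), (0 : Int))).1 := by
      rw [PySem.List.pyGetD_eq_getElem j 0 h0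
          (by first | exact hjl | simp only [PySem.List.len_eq] ; omega),
        PySem.List.pyGetD_eq_getElem (j.zip k) ((0 : Int), (0 : Int)) h0
          (by first | exact hzz | simp only [PySem.List.len_eq] ; omega)]
      rw [List.getElem_zip]
    have hkz : PySem.List.pyGetD k l 0 = (PySem.List.pyGetD (j.zip k) l ((0 : Int), (0 : Int))).2 := by
      rw [PySem.List.pyGetD_eq_getElem k 0 h0
          (by first | exact hkl | simp only [PySem.List.len_eq] ; omega),
        PySem.List.pyGetD_eq_getElem (j.zip k) ((0 : Int), (0 : Int)) h0
          (by first | exact hzz | simp only [PySem.List.len_eq] ; omega)]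
      rw [List.getElem_zip]
    rw [hjz, hkz]
  refine (PySem.List.foldl_congr_mem _ _ _ st hcongr).trans ?_
  refine (PySem.List.foldl_pyRange_zero_pyGetD (j.zip k) ((0 : Int), (0 : Int))
    (fun st q => if q.1 > q.2 then F st q.1 else st) st).trans ?_
  rw [List.foldl_map, List.foldl_filter]
  simp

theorem pv_filterMap_len {a : Type} (v : List a) (f : Nat → Nat) (c : Nat)
    (hall : forall x, x < c → f x < v.length) :
    (List.filterMap (fun x => v[f x]?) (List.range c)).length = c := by
  induction c with
  | zero => simp
  | succ c ih =>
    rw [List.range_succ, List.filterMap_append, List.length_append,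
      ih (fun x hx => hall x (by omega))]
    have hc := hall c (by omega)
    simp [List.getElem?_eq_getElem hc]

theorem pv_len_even (v : List Int) (h : v.length % 2 = 0) : (pvEven v).length = (pvOdd v).length := by
  rcases v with _ | ⟨a, w⟩
  · rfl
  · simp only [List.length_cons] at h
    unfold pvEven pvOdd
    simp only [PySem.List.slice?, PySem.List.sliceIndices]
    norm_num
    rw [if_pos (by omega : 0 < w.length)]
    rw [pv_filterMap_len (a :: w) (fun x => ((2 : Int) * (x : Int)).toNat)
      (((w.length : Int) + 1 + 2 - 1) / 2).toNat
      (by intro x hx; simp only [List.length_cons]; omega)]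
    rw [pv_filterMap_len (a :: w) (fun x => ((1 : Int) + 2 * (x : Int)).toNat)
      (((w.length : Int) + 2 - 1) / 2).toNat
      (by intro x hx; simp only [List.length_cons]; omega)]
    omega

-- characterisations of port A's per-sentence data -------------------------------------------------

theorem pv_stayA_get? (sent : List (String × List Int)) (hnd : (sent.map Prod.fst).Nodup)
    (hev : forall p, p ∈ sent → p.2.length % 2 = 0) (t : String) :
    (pvStayA sent).get? t =
      (match (PySem.Dict.mk sent).get? t with
       | none => none
       | some v => if pvLf v = [] then none else some (pvLf v)) := by
  have hkeys : (PySem.Dict.mk sent).keys = sent.map Prod.fst := by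
    simpa using PySem.Dict.keys_mk sent
  have heven : forall i, i ∈ (PySem.Dict.mk sent).keys →
      ((PySem.Dict.mk sent).getD i []).length % 2 = 0 := by
    intro i hi
    cases hget : (PySem.Dict.mk sent).get? i with
    | none =>
      have hni := (PySem.Dict.get?_eq_none_iff_not_mem_keys (PySem.Dict.mk sent) i).mp hget
      exact absurd hi hni
    | some w =>
      rw [PySem.Dict.getD_of_get?_eq_some _ [] hget]
      have hfind := pv_mk_get? sent i
      rw [hget] at hfind
      cases hfq : sent.find? (fun q => q.1 == i) with
      | none => rw [hfq] at hfind; simp at hfind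
      | some q =>
        rw [hfq] at hfind
        have hqmem : q ∈ sent := List.mem_of_find?_eq_some hfq
        have hwq : w = q.2 := by simpa using hfind
        rw [hwq]
        exact hev q hqmem
  have hstep : forall (stay : PySem.Dict String (List Int)),
      forall i, i ∈ (PySem.Dict.mk sent).keys →
      ((PySem.List.pyRange 0 (PySem.List.len (pvEven ((PySem.Dict.mk sent).getD i [])))).foldl
        (fun stay l =>
          if PySem.List.pyGetD (pvEven ((PySem.Dict.mk sent).getD i [])) l 0 >
              PySem.List.pyGetD (pvOdd ((PySem.Dict.mk sent).getD i [])) l 0 then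
            stay.insert i
              (stay.getD i [] ++ [PySem.List.pyGetD (pvEven ((PySem.Dict.mk sent).getD i [])) l 0])
          else stay) stay) =
      (if pvLf ((PySem.Dict.mk sent).getD i []) = [] then stay
       else stay.insert i (stay.getD i [] ++ pvLf ((PySem.Dict.mk sent).getD i []))) := by
    intro stay i hi
    have hl : (pvEven ((PySem.Dict.mk sent).getD i [])).length =
        (pvOdd ((PySem.Dict.mk sent).getD i [])).length := pv_len_even _ (heven i hi)
    rw [pv_jk_fold _ _ hl (fun stay a => stay.insert i (stay.getD i [] ++ [a])) stay]
    exact pv_app_fold _ i stay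
  unfold pvStayA
  rw [PySem.List.foldl_congr_mem _ _ _ PySem.Dict.empty hstep]
  rw [pv_condins_get? _ _ _ (by simp [PySem.Dict.contains_empty]) (by rw [hkeys]; exact hnd) t]
  cases hget : (PySem.Dict.mk sent).get? t with
  | none =>
    have hnk : t ∉ (PySem.Dict.mk sent).keys :=
      (PySem.Dict.get?_eq_none_iff_not_mem_keys (PySem.Dict.mk sent) t).mp hget
    rw [if_neg (fun hcon => hnk hcon.1)]
    simp [PySem.Dict.get?_empty]
  | some v =>
    have htk : t ∈ (PySem.Dict.mk sent).keys := by
      by_contra hcon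
      rw [← PySem.Dict.get?_eq_none_iff_not_mem_keys] at hcon
      rw [hcon] at hget; cases hget
    have hgd : (PySem.Dict.mk sent).getD t [] = v := PySem.Dict.getD_of_get?_eq_some _ [] hget
    rw [hgd]
    by_cases hLf : pvLf v = []
    · rw [if_neg (fun hcon => hcon.2 hLf)]
      show PySem.Dict.empty.get? t = if pvLf v = [] then none else some (pvLf v)
      rw [if_pos hLf]
      simp [PySem.Dict.get?_empty]
    · rw [if_pos ⟨htk, hLf⟩]
      show some (pvLf v) = if pvLf v = [] then none else some (pvLf v)
      rw [if_neg hLf]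

theorem pv_ALL_keys (all : List (List (String × List Int))) (tg : List String) :
    (pvALL all tg).keys = PySem.List.dedup tg := by
  unfold pvALL
  rw [PySem.Dict.keys_foldl_insert tg _ PySem.Dict.empty, PySem.Dict.keys_empty,
    PySem.Set.update_nil_left, ← PySem.List.dedup_eq_ofList]

theorem pv_ALL_getD (all : List (List (String × List Int))) (tg : List String) (dt : String)
    (hdt : dt ∈ tg) :
    (pvALL all tg).getD dt [] =
      all.map (fun sent => ((PySem.Dict.mk sent).get? dt).map pvOdd) := by
  unfold pvALL
  have hget := pv_keyfn_get? tg
    (fun hh => all.foldl (fun acc sent =>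
      if (PySem.Dict.mk sent).contains hh then
        acc ++ [some (pvOdd ((PySem.Dict.mk sent).getD hh []))]
      else acc ++ [none]) []) PySem.Dict.empty dt
  rw [if_pos hdt] at hget
  rw [PySem.Dict.getD_of_get?_eq_some _ [] hget]
  have hbody : forall (acc : List (Option (List Int))), forall sent, sent ∈ all →
      (if (PySem.Dict.mk sent).contains dt then
        acc ++ [some (pvOdd ((PySem.Dict.mk sent).getD dt []))]
      else acc ++ [none]) =
      acc ++ [((PySem.Dict.mk sent).get? dt).map pvOdd] := by
    intro acc sent _
    cases hg : (PySem.Dict.mk sent).get? dt with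
    | none =>
      have hcf : (PySem.Dict.mk sent).contains dt = false := by
        rw [PySem.Dict.contains_eq_isSome_get?, hg]; rfl
      simp [hcf]
    | some w =>
      have hct : (PySem.Dict.mk sent).contains dt = true := by
        rw [PySem.Dict.contains_eq_isSome_get?, hg]; rfl
      rw [PySem.Dict.getD_of_get?_eq_some _ [] hg]
      simp [hct]
  rw [PySem.List.foldl_congr_mem _ _ _ [] hbody]
  simpa using PySem.List.foldl_append_singleton_eq_map
    (fun sent => ((PySem.Dict.mk sent).get? dt).map pvOdd) all []

-- reduction of port A to the normal form ----------------------------------------------------------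

theorem pv_stay3_eq (all : List (List (String × List Int))) (tg : List String)
    (hpre : Pre_leftArc all tg) (tup : String) :
    pvStay3 all tg tup =
      all.foldl (fun s sent => pvT sent (PySem.List.dedup tg) tup s) PySem.Dict.empty := by
  have hAL : pvAllLeft all = all.map pvStayA := by
    unfold pvAllLeft
    simpa using PySem.List.foldl_append_singleton_eq_map pvStayA all []
  have hstep : forall (st : PySem.Dict String Int), forall q,
      q ∈ PySem.List.enumerate all 0 →
      pvF all tg tup st q.1 (pvStayA q.2) = pvT q.2 (PySem.List.dedup tg) tup st := by
    intro st q hq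
    rw [PySem.List.mem_enumerate_iff] at hq
    obtain ⟨kk, hk, rfl⟩ := hq
    dsimp only
    obtain ⟨hnd, hev⟩ := hpre all[kk] (List.getElem_mem hk)
    unfold pvF pvT
    cases hget : (PySem.Dict.mk all[kk]).get? tup with
    | none =>
      have hcf : (pvStayA all[kk]).contains tup = false := by
        rw [PySem.Dict.contains_eq_isSome_get?, pv_stayA_get? all[kk] hnd hev tup, hget]
        rfl
      simp [hcf]
    | some v =>
      by_cases hLf : pvLf v = []
      · have hcf : (pvStayA all[kk]).contains tup = false := by
          rw [PySem.Dict.contains_eq_isSome_get?, pv_stayA_get? all[kk] hnd hev tup, hget]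
          simp [hLf]
        simp [hcf, hLf]
      · have hct : (pvStayA all[kk]).contains tup = true := by
          rw [PySem.Dict.contains_eq_isSome_get?, pv_stayA_get? all[kk] hnd hev tup, hget]
          simp [hLf]
        have hj : (pvStayA all[kk]).getD tup [] = pvLf v := by
          apply PySem.Dict.getD_of_get?_eq_some
          rw [pv_stayA_get? all[kk] hnd hev tup, hget]
          simp [hLf]
        rw [hj, hct]
        rw [if_pos rfl]
        simp only [Option.map_some]
        rw [if_neg hLf, pv_ALL_keys]
        unfold pvInner
        apply PySem.List.foldl_congr_mem
        intro stay dt hdt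
        have hdtg : dt ∈ tg := (PySem.List.mem_dedup tg dt).1 hdt
        rw [pv_ALL_getD all tg dt hdtg]
        have hidx : PySem.List.pyGetD
            (all.map (fun sent => ((PySem.Dict.mk sent).get? dt).map pvOdd)) ((0 : Int) + kk) none =
            ((PySem.Dict.mk all[kk]).get? dt).map pvOdd := by
          rw [zero_add, PySem.List.pyGetD_natCast]
          rw [List.getD_eq_getElem _ _ (by simpa using hk)]
          simp
        rw [hidx]
        cases hw : (PySem.Dict.mk all[kk]).get? dt with
        | none =>
          simp only [Option.map_none]
          exact List.foldl_fixed _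
        | some w =>
          simp only [Option.map_some]
          exact ((PySem.List.foldl_pyRange_zero_pyGetD (pvLf v) 0
              (fun stay a => if (pvOdd w).contains a then
                (if stay.contains dt then stay.insert dt (stay.getD dt 0 + 1)
                 else stay.insert dt 1)
                else stay) stay).trans
            (pv_incr_fold (pvLf v) (fun a => (pvOdd w).contains a) dt stay))
  calc pvStay3 all tg tup
      = (PySem.List.enumerate (pvAllLeft all) 0).foldl
          (fun st q => pvF all tg tup st q.1 q.2) PySem.Dict.empty :=
        pv_foldl_enum (pvAllLeft all) (pvF all tg tup) PySem.Dict.empty 0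
    _ = (PySem.List.enumerate (all.map pvStayA) 0).foldl
          (fun st q => pvF all tg tup st q.1 q.2) PySem.Dict.empty := by rw [hAL]
    _ = ((PySem.List.enumerate all 0).map (fun q => (q.1, pvStayA q.2))).foldl
          (fun st q => pvF all tg tup st q.1 q.2) PySem.Dict.empty := by
        rw [pv_enumerate_map]
    _ = (PySem.List.enumerate all 0).foldl
          (fun st q => pvF all tg tup st q.1 (pvStayA q.2)) PySem.Dict.empty :=
        List.foldl_map
    _ = (PySem.List.enumerate all 0).foldl
          (fun st q => pvT q.2 (PySem.List.dedup tg) tup st) PySem.Dict.empty :=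
        PySem.List.foldl_congr_mem _ _ _ PySem.Dict.empty hstep
    _ = all.foldl (fun s sent => pvT sent (PySem.List.dedup tg) tup s) PySem.Dict.empty :=
        pv_foldl_snd all (fun s sent => pvT sent (PySem.List.dedup tg) tup s) PySem.Dict.empty 0

theorem pv_A_eq (all : List (List (String × List Int))) (tg : List String)
    (hpre : Pre_leftArc all tg) : leftArc all tg = pvGoal all tg := by
  rw [pvA_unfold]
  have hbody : (fun (lt : PySem.Dict String (PySem.Dict String Int)) tup =>
      lt.insert tup (pvStay3 all tg tup)) =
      (fun lt tup => lt.insert tup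
        (all.foldl (fun s sent => pvT sent (PySem.List.dedup tg) tup s) PySem.Dict.empty)) := by
    funext lt tup
    rw [pv_stay3_eq all tg hpre tup]
  rw [hbody]
  rw [pv_items_keyfn tg
    (fun tup => all.foldl (fun s sent => pvT sent (PySem.List.dedup tg) tup s) PySem.Dict.empty)
    PySem.Dict.empty]
  unfold pvGoal
  rw [List.map_map]
  rfl

-- B-side: characterisation of the inverted index --------------------------------------------------

-- Set.add facts used below
theorem pv_set_add_mem (l : List String) (t : String) (h : t ∈ l) : PySem.Set.add l t = l := by
  unfold PySem.Set.add
  rw [if_pos ((PySem.Set.contains_iff _ _).mpr h)]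

theorem pv_set_add_not_mem (l : List String) (t : String) (h : t ∉ l) :
    PySem.Set.add l t = l ++ [t] := by
  unfold PySem.Set.add
  rw [if_neg (fun hc => h ((PySem.Set.contains_iff _ _).mp hc))]

-- inner loop of the index builder: for v in seq[1::2]: inv.setdefault(v, set()).add(t)
theorem pv_inv_inner (vs : List Int) (t : String) (inv : PySem.Dict Int (PySem.Set String))
    (a : Int) :
    ((vs.foldl (fun inv v => inv.insert v (PySem.Set.add (inv.getD v []) t)) inv).getD a []) =
      if a ∈ vs then PySem.Set.add (inv.getD a []) t else inv.getD a [] := by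
  induction vs generalizing inv with
  | nil => simp
  | cons v vs ih =>
    rw [List.foldl_cons, ih]
    by_cases hav : a = v
    · subst hav
      by_cases havs : a ∈ vs
      · simp only [havs, if_true, List.mem_cons, true_or, PySem.Dict.getD_insert_self]
        by_cases ht : t ∈ inv.getD a []
        · rw [pv_set_add_mem _ _ ht, pv_set_add_mem _ _ ht]
        · rw [pv_set_add_not_mem _ _ ht, pv_set_add_mem _ _ (by simp)]
      · simp [havs, PySem.Dict.getD_insert_self]
    · rw [PySem.Dict.getD_insert_of_ne _ _ _ hav]
      simp [List.mem_cons, hav]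

-- Bool-valued "tag t's odd values contain a in this sentence"
def pvMatch (sent : List (String × List Int)) (a : Int) (t : String) : Bool :=
  match (PySem.Dict.mk sent).get? t with
  | some seq => (pvOdd seq).contains a
  | none => false

theorem pv_inv_spec (ts : List String) (sent : List (String × List Int)) (hts : ts.Nodup)
    (inv : PySem.Dict Int (PySem.Set String))
    (hdisj : forall a t, t ∈ ts → t ∉ inv.getD a []) (a : Int) :
    ((ts.foldl (fun inv t =>
        match (PySem.Dict.mk sent).get? t with
        | none => inv
        | some seq =>
          (pvOdd seq).foldl (fun inv v =>
            inv.insert v (PySem.Set.add (inv.getD v []) t)) inv) inv).getD a []) =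
      inv.getD a [] ++ ts.filter (fun t => pvMatch sent a t) := by
  induction ts generalizing inv with
  | nil => simp
  | cons t ts ih =>
    have htts : t ∉ ts := (List.nodup_cons.mp hts).1
    rw [List.foldl_cons]
    cases hget : (PySem.Dict.mk sent).get? t with
    | none =>
      rw [ih (List.nodup_cons.mp hts).2 inv (fun a' t' ht' => hdisj a' t' (List.mem_cons_of_mem t ht'))]
      have hm : pvMatch sent a t = false := by simp [pvMatch, hget]
      rw [List.filter_cons, hm]
      simp
    | some seq =>
      have hinv' : forall a', ((pvOdd seq).foldl (fun inv v =>
          inv.insert v (PySem.Set.add (inv.getD v []) t)) inv).getD a' [] =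
          if a' ∈ pvOdd seq then inv.getD a' [] ++ [t] else inv.getD a' [] := by
        intro a'
        rw [pv_inv_inner]
        by_cases h : a' ∈ pvOdd seq
        · rw [if_pos h, if_pos h, pv_set_add_not_mem _ _ (hdisj a' t List.mem_cons_self)]
        · rw [if_neg h, if_neg h]
      rw [ih (List.nodup_cons.mp hts).2 _ (by
        intro a' t' ht'
        rw [hinv' a']
        have hne : t' ≠ t := fun h => htts (h ▸ ht')
        by_cases h : a' ∈ pvOdd seq
        · rw [if_pos h]
          intro hmem
          rcases List.mem_append.mp hmem with hmem | hmem
          · exact hdisj a' t' (List.mem_cons_of_mem t ht') hmem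
          · exact hne (by simpa using hmem)
        · rw [if_neg h]
          exact hdisj a' t' (List.mem_cons_of_mem t ht'))]
      rw [hinv' a]
      have hm : pvMatch sent a t = (pvOdd seq).contains a := by simp [pvMatch, hget]
      rw [List.filter_cons, hm]
      by_cases h : a ∈ pvOdd seq
      · rw [if_pos h, if_pos (List.contains_iff_mem.mpr h), List.append_assoc]
        rfl
      · rw [if_neg h]
        have : (pvOdd seq).contains a = false := by
          cases hc : (pvOdd seq).contains a
          · rfl
          · exact absurd (List.contains_iff_mem.mp hc) h
        rw [this]
        simp

theorem pv_inv_getD (tags : List String) (sent : List (String × List Int)) (htags : tags.Nodup)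
    (a : Int) :
    (pvInv tags sent).getD a [] = tags.filter (fun t => pvMatch sent a t) := by
  unfold pvInv
  rw [pv_inv_spec tags sent htags PySem.Dict.empty
    (by intro a' t' _; simp [PySem.Dict.getD_of_not_contains _ _ (PySem.Dict.contains_empty t')])]
  simp [PySem.Dict.getD_of_not_contains _ _ (PySem.Dict.contains_empty a)]

-- B-side: the step-2 index loop over v visits exactly the (even, odd) pairs ---------------------

theorem pvEven_nil : pvEven ([] : List Int) = [] := rfl
theorem pvOdd_nil : pvOdd ([] : List Int) = [] := rfl
theorem pvEven_single (a : Int) : pvEven [a] = [a] := by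
  simp [pvEven, PySem.List.slice?, PySem.List.sliceIndices]
theorem pvOdd_single (a : Int) : pvOdd [a] = [] := by
  simp [pvOdd, PySem.List.slice?, PySem.List.sliceIndices]

theorem pvEven_cons2 (a b : Int) (w : List Int) : pvEven (a :: b :: w) = a :: pvEven w := by
  simp only [pvEven, PySem.List.slice?, PySem.List.sliceIndices]
  norm_num
  have hc : (if (0:Int) ≤ (w.length:Int) + 1 then (((w.length:Int) + 1 + 1 + 2 - 1) / 2).toNat else 0)
      = (if 0 < w.length then (((w.length:Int) + 2 - 1) / 2).toNat else 0) + 1 := by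
    split_ifs <;> omega
  rw [hc, List.range_succ_eq_map, List.filterMap_cons]
  norm_num
  apply List.filterMap_congr
  intro x _
  have h2 : ((2:Int) * ((x:Int) + 1)).toNat = (2 * (x:Int)).toNat + 1 + 1 := by omega
  simp [h2]

theorem pvOdd_cons2 (a b : Int) (w : List Int) : pvOdd (a :: b :: w) = b :: pvOdd w := by
  simp only [pvOdd, PySem.List.slice?, PySem.List.sliceIndices]
  norm_num
  rw [show min 1 ((w.length:Int)+1+1) = 1 from by omega]
  have hc : (((w.length:Int) + 1 + 1 - 1 + 2 - 1)/2).toNat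
      = (if 1 < w.length then (((w.length:Int) - min 1 (w.length:Int) + 2 - 1)/2).toNat else 0) + 1 := by
    split_ifs <;> omega
  rw [hc, List.range_succ_eq_map, List.filterMap_cons]
  norm_num
  apply List.filterMap_congr
  intro x hx
  by_cases hml : 1 < w.length
  · have h2 : ((1:Int) + 2 * ((x:Int) + 1)).toNat = (min 1 (w.length:Int) + 2*(x:Int)).toNat + 1 + 1 := by
      omega
    simp [h2]
  · simp [hml] at hx

theorem pv_even_getD : forall (v : List Int) (l : Nat), (pvEven v).getD l 0 = v.getD (2*l) 0
  | [], l => by simp [pvEven_nil]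
  | [a], l => by
    cases l with
    | zero => simp [pvEven_single]
    | succ l => simp [pvEven_single, List.getD]
  | a :: b :: w, l => by
    cases l with
    | zero => simp [pvEven_cons2]
    | succ l =>
      rw [pvEven_cons2, List.getD_cons_succ, pv_even_getD w l,
        show 2*(l+1) = 2*l + 1 + 1 from by omega, List.getD_cons_succ, List.getD_cons_succ]

theorem pv_odd_getD : forall (v : List Int) (l : Nat), (pvOdd v).getD l 0 = v.getD (2*l+1) 0
  | [], l => by simp [pvOdd_nil]
  | [a], l => by simp [pvOdd_single, List.getD]
  | a :: b :: w, l => by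
    cases l with
    | zero => simp [pvOdd_cons2]
    | succ l =>
      rw [pvOdd_cons2, List.getD_cons_succ, pv_odd_getD w l,
        show 2*(l+1)+1 = (2*l+1) + 1 + 1 from by omega, List.getD_cons_succ, List.getD_cons_succ]

theorem pvEven_length : forall (v : List Int), (pvEven v).length = (v.length + 1) / 2
  | [] => by simp [pvEven_nil]
  | [a] => by simp [pvEven_single]
  | a :: b :: w => by
    rw [pvEven_cons2]
    simp only [List.length_cons, pvEven_length w]
    omega

theorem pv_jk_fold_nat {s : Type} (j k : List Int) (hlen : j.length = k.length) (F : s → Int → s)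
    (st : s) :
    (List.range j.length).foldl (fun st l =>
        if j.getD l 0 > k.getD l 0 then F st (j.getD l 0) else st) st =
      (((j.zip k).filter (fun q => q.1 > q.2)).map (·.1)).foldl F st := by
  have h := pv_jk_fold j k hlen F st
  have hn : (PySem.List.len j).toNat = j.length := by simp [PySem.List.len_eq]
  rw [PySem.List.pyRange_zero, hn, List.foldl_map] at h
  simpa [PySem.List.pyGetD_natCast] using h

theorem pv_pairfold {s : Type} (v : List Int) (hev : v.length % 2 = 0) (F : s → Int → s) (st : s) :
    (PySem.List.pyRange 0 (PySem.List.len v) 2).foldl (fun st i =>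
        if PySem.List.pyGetD v i 0 > PySem.List.pyGetD v (i+1) 0 then
          F st (PySem.List.pyGetD v i 0)
        else st) st =
      ((((pvEven v).zip (pvOdd v)).filter (fun q => q.1 > q.2)).map (·.1)).foldl F st := by
  rw [PySem.List.pyRange_of_pos 0 (PySem.List.len v) (by norm_num : (0:Int) < 2)]
  have hcnt : (if (0:Int) < PySem.List.len v then ((PySem.List.len v - 0 + 2 - 1)/2).toNat else 0)
      = (pvEven v).length := by
    simp only [PySem.List.len_eq]
    rw [pvEven_length]
    split_ifs <;> omega
  rw [hcnt, List.foldl_map]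
  have hstep : forall (st : s), forall k, k ∈ List.range (pvEven v).length →
      (if PySem.List.pyGetD v (0 + 2 * (k:Int)) 0 > PySem.List.pyGetD v (0 + 2 * (k:Int) + 1) 0 then
        F st (PySem.List.pyGetD v (0 + 2 * (k:Int)) 0) else st) =
      (if (pvEven v).getD k 0 > (pvOdd v).getD k 0 then F st ((pvEven v).getD k 0) else st) := by
    intro st k _
    have e1 : (0 + 2 * ((k:Nat):Int)) = ((2*k : Nat) : Int) := by push_cast; ring
    have e2 : (0 + 2 * ((k:Nat):Int) + 1) = ((2*k+1 : Nat) : Int) := by push_cast; ring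
    rw [e2, e1, PySem.List.pyGetD_natCast, PySem.List.pyGetD_natCast,
      ← pv_even_getD v k, ← pv_odd_getD v k]
  rw [PySem.List.foldl_congr_mem _ _ _ st hstep]
  exact pv_jk_fold_nat (pvEven v) (pvOdd v) (pv_len_even v hev) F st

-- B-side: characterisation of the counter ---------------------------------------------------------

theorem pv_cnt_nested (j : List Int) (G : Int → List String) (d : PySem.Dict String Int)
    (t : String) :
    (j.foldl (fun cnt a => (G a).foldl (fun cnt t => cnt.insert t (cnt.getD t 0 + 1)) cnt) d).getD t 0 =
      d.getD t 0 + ((j.map (fun a => ((G a).count t : Int))).sum) := by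
  induction j generalizing d with
  | nil => simp
  | cons a j ih =>
    rw [List.foldl_cons, ih, PySem.Dict.getD_foldl_insert_add_one]
    simp [add_assoc]

theorem pv_cnt_getD (tags : List String) (sent : List (String × List Int)) (htags : tags.Nodup)
    (v : List Int) (hev : v.length % 2 = 0) (t : String) (ht : t ∈ tags) :
    (pvCnt (pvInv tags sent) v).getD t 0 =
      ((pvLf v).countP (fun a => pvMatch sent a t) : Int) := by
  have hzf : pvCnt (pvInv tags sent) v =
      (pvLf v).foldl (fun cnt a =>
        ((pvInv tags sent).getD a []).foldl (fun cnt t => cnt.insert t (cnt.getD t 0 + 1)) cnt)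
        PySem.Dict.empty := by
    unfold pvCnt pvLf
    exact pv_pairfold v hev
      (fun (cnt : PySem.Dict String Int) a => ((pvInv tags sent).getD a []).foldl
        (fun cnt t => cnt.insert t (cnt.getD t 0 + 1)) cnt) PySem.Dict.empty
  rw [hzf, pv_cnt_nested]
  rw [PySem.Dict.getD_of_not_contains _ _ (PySem.Dict.contains_empty t), zero_add]
  have hcount : forall a, ((pvInv tags sent).getD a []).count t =
      if pvMatch sent a t then 1 else 0 := by
    intro a
    rw [pv_inv_getD tags sent htags a]
    by_cases hm : pvMatch sent a t = true
    · rw [if_pos hm]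
      have hmem : t ∈ tags.filter (fun t => pvMatch sent a t) :=
        List.mem_filter.mpr ⟨ht, hm⟩
      exact List.count_eq_one_of_mem (List.Nodup.filter _ htags) hmem
    · rw [if_neg hm]
      apply List.count_eq_zero.mpr
      intro hmem
      exact hm (List.mem_filter.mp hmem).2
  induction pvLf v with
  | nil => simp
  | cons a j ih =>
    rw [List.map_cons, List.sum_cons, ih, List.countP_cons, hcount a]
    by_cases hm : pvMatch sent a t = true
    · simp only [hm, if_true]
      push_cast
      ring
    · simp [hm]

-- B-side: the per-pair update equals pvInner -------------------------------------------------------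

theorem pv_inner_nil (h : PySem.Dict String (List Int)) (ts : List String)
    (stay : PySem.Dict String Int) : pvInner h ts [] stay = stay := by
  unfold pvInner
  rw [PySem.List.foldl_congr_mem ts _ (fun stay _ => stay) stay (by
    intro stay dt _
    cases (h.get? dt).map pvOdd with
    | none => rfl
    | some l => simp)]
  exact List.foldl_fixed _

theorem pv_U_eq_inner (tags : List String) (sent : List (String × List Int)) (htags : tags.Nodup)
    (v : List Int) (hev : v.length % 2 = 0) (stay : PySem.Dict String Int) :
    pvU tags sent v stay = pvInner (PySem.Dict.mk sent) tags (pvLf v) stay := by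
  unfold pvU pvInner
  apply PySem.List.foldl_congr_mem
  intro stay dt hdt
  rw [pv_cnt_getD tags sent htags v hev dt hdt]
  cases hget : (PySem.Dict.mk sent).get? dt with
  | none =>
    have hm : forall a, pvMatch sent a dt = false := by intro a; simp [pvMatch, hget]
    have hc : (pvLf v).countP (fun a => pvMatch sent a dt) = 0 := by
      apply List.countP_eq_zero.mpr
      intro a _
      simp [hm a]
    simp [hc]
  | some seq =>
    have hm : forall a, pvMatch sent a dt = (pvOdd seq).contains a := by
      intro a; simp [pvMatch, hget]
    have hc : (pvLf v).countP (fun a => pvMatch sent a dt) =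
        (pvLf v).countP (fun a => (pvOdd seq).contains a) := by
      apply List.countP_congr
      intro a _
      rw [hm a]
    rw [hc]
    simp only [Option.map_some, ne_eq, Int.natCast_eq_zero]
    rw [ite_not]

-- B-side: the pair loop over one sentence ----------------------------------------------------------

theorem pv_resfold (sent : List (String × List Int)) (hnd : (sent.map Prod.fst).Nodup)
    (ts : List String) (hts : ts.Nodup)
    (U : String → List Int → PySem.Dict String Int → PySem.Dict String Int)
    (res : PySem.Dict String (PySem.Dict String Int)) (S : String → PySem.Dict String Int)
    (hit : res.items = ts.map (fun t => (t, S t))) :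
    (sent.foldl (fun res p =>
        if res.contains p.1 then res.insert p.1 (U p.1 p.2 (res.getD p.1 PySem.Dict.empty))
        else res) res).items =
      ts.map (fun t => (t,
        match (PySem.Dict.mk sent).get? t with
        | some v => U t v (S t)
        | none => S t)) := by
  induction sent generalizing res S with
  | nil =>
    rw [List.foldl_nil, hit]
    apply List.map_congr_left
    intro t _
    rfl
  | cons p rest ih =>
    obtain ⟨k, w⟩ := p
    rw [List.map_cons, List.nodup_cons] at hnd
    obtain ⟨hp_not, hnd'⟩ := hnd
    have hkeys : res.keys = ts := by
      show res.items.map Prod.fst = ts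
      rw [hit, List.map_map]
      rw [show (Prod.fst ∘ fun t => (t, S t)) = id from rfl, List.map_id]
    have hknd : res.keys.Nodup := by rw [hkeys]; exact hts
    rw [List.foldl_cons]
    by_cases hpts : k ∈ ts
    · have hct : res.contains k = true :=
        (PySem.Dict.contains_iff_mem_keys res k).mpr (hkeys ▸ hpts)
      rw [if_pos hct]
      have hgd : res.getD k PySem.Dict.empty = S k := by
        apply PySem.Dict.getD_of_mem_items res _ hknd
        rw [hit]
        exact List.mem_map_of_mem hpts
      rw [hgd]
      have hit' : (res.insert k (U k w (S k))).items =
          ts.map (fun t => (t, if t = k then U k w (S k) else S t)) := by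
        rw [PySem.Dict.items_insert_of_contains res _ hct, hit, List.map_map]
        apply List.map_congr_left
        intro t _
        by_cases htp : t = k
        · simp [Function.comp, htp]
        · simp [Function.comp, htp]
      rw [ih hnd' _ _ hit']
      apply List.map_congr_left
      intro t _
      rw [PySem.Dict.get?_mk_cons]
      by_cases htp : t = k
      · subst htp
        have hnone : (PySem.Dict.mk rest).get? t = none := by
          rw [PySem.Dict.get?_eq_none_iff_not_mem_keys]
          rw [PySem.Dict.keys_mk]
          intro hmem
          apply hp_not
          simpa using hmem
        simp [hnone]
      · have hbf : (k == t) = false := beq_eq_false_iff_ne.mpr (Ne.symm htp)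
        simp [hbf, htp]
    · have hcf : res.contains k = false := by
        cases hc : res.contains k
        · rfl
        · exact absurd (hkeys ▸ (PySem.Dict.contains_iff_mem_keys res k).mp hc) hpts
      rw [if_neg (by simp [hcf])]
      rw [ih hnd' res S hit]
      apply List.map_congr_left
      intro t ht
      rw [PySem.Dict.get?_mk_cons]
      have htp : t ≠ k := fun h => hpts (h ▸ ht)
      have hbf : (k == t) = false := beq_eq_false_iff_ne.mpr (Ne.symm htp)
      simp [hbf]

theorem pv_BStep_items (sent : List (String × List Int)) (hnd : (sent.map Prod.fst).Nodup)
    (hev : forall p, p ∈ sent → p.2.length % 2 = 0)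
    (ts : List String) (hts : ts.Nodup) (res : PySem.Dict String (PySem.Dict String Int))
    (S : String → PySem.Dict String Int) (hit : res.items = ts.map (fun t => (t, S t))) :
    (pvBStep ts sent res).items = ts.map (fun t => (t, pvT sent ts t (S t))) := by
  unfold pvBStep
  rw [pv_resfold sent hnd ts hts (fun _ v stay => pvU ts sent v stay) res S hit]
  apply List.map_congr_left
  intro t _
  unfold pvT
  cases hget : (PySem.Dict.mk sent).get? t with
  | none => rfl
  | some v =>
    have hv : v.length % 2 = 0 := by
      have hfind := pv_mk_get? sent t
      rw [hget] at hfind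
      cases hfq : sent.find? (fun q => q.1 == t) with
      | none => rw [hfq] at hfind; simp at hfind
      | some q =>
        rw [hfq] at hfind
        have hqmem : q ∈ sent := List.mem_of_find?_eq_some hfq
        have hvq : v = q.2 := by simpa using hfind
        rw [hvq]
        exact hev q hqmem
    simp only [Option.map_some]
    rw [pv_U_eq_inner ts sent hts v hv (S t)]
    by_cases hLf : pvLf v = []
    · rw [if_pos hLf, hLf, pv_inner_nil]
    · rw [if_neg hLf]

theorem pv_B_outer (all : List (List (String × List Int))) (ts : List String) (hts : ts.Nodup)
    (hpre : forall sent, sent ∈ all →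
      (sent.map Prod.fst).Nodup ∧ forall p, p ∈ sent → p.2.length % 2 = 0)
    (lt : PySem.Dict String (PySem.Dict String Int)) (S : String → PySem.Dict String Int)
    (hit : lt.items = ts.map (fun t => (t, S t))) :
    (all.foldl (fun lt sent => pvBStep ts sent lt) lt).items =
      ts.map (fun t => (t, all.foldl (fun s sent => pvT sent ts t s) (S t))) := by
  induction all generalizing lt S with
  | nil => simpa using hit
  | cons sent rest ih =>
    rw [List.foldl_cons]
    exact ih (fun s hs => hpre s (List.mem_cons_of_mem sent hs)) (pvBStep ts sent lt)
      (fun t => pvT sent ts t (S t))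
      (pv_BStep_items sent (hpre sent List.mem_cons_self).1 (hpre sent List.mem_cons_self).2
        ts hts lt S hit)

theorem pv_B_eq (all : List (List (String × List Int))) (tg : List String)
    (hpre : Pre_leftArc all tg) : leftArc_alt all tg = pvGoal all tg := by
  rw [pvB_unfold]
  have hinit : (pvInit (PySem.List.dedup tg)).items =
      (PySem.List.dedup tg).map (fun t => (t, (PySem.Dict.empty : PySem.Dict String Int))) := by
    unfold pvInit
    have hfresh := PySem.Dict.items_foldl_insert_fresh (PySem.List.dedup tg) (fun t => t)
      (fun _ => (PySem.Dict.empty : PySem.Dict String Int)) PySem.Dict.empty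
      (by intro a _; simp [PySem.Dict.contains_empty])
      (by simpa using PySem.List.nodup_dedup tg)
    simpa using hfresh
  rw [pv_B_outer all (PySem.List.dedup tg) (PySem.List.nodup_dedup tg)
    (fun sent hs => hpre sent hs) (pvInit (PySem.List.dedup tg)) (fun _ => PySem.Dict.empty)
    hinit]
  unfold pvGoal
  rw [List.map_map]
  rfl

-- ===== VERDICT (by name: the statement is the Claim_ definition above) =====
theorem leftArc_spec : Claim_equal_leftArc := by
  intro all tg _ hpre
  unfold Spec_leftArc
  exact (pv_A_eq all tg hpre).trans (pv_B_eq all tg hpre).symm
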